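-- pv_equiv track=rewrite | github.com/dilipkumar08/2025 | problem solving/leetcode/minimumRecolors.py | minimumRecolors2
-- ===== SOURCE A (Python) =====
-- def minimumRecolors2(blocks: str, k: int) -> int:
--     res=k
--     recolor=0
--     l=0
--     for  r in range(len(blocks)):
--         if blocks[r]=='W':
--             recolor+=1
--         if r-l+1==k:
--             res=min(res,recolor)
--             if blocks[l]=='W':
--                 recolor-=1
--             l+=1
--         if res==0:
--             break
--     return res
-- ===== SOURCE B (Python) =====
-- def minimumRecolors2(blocks: str, k: int) -> int:
--     if k < 1:
--         return k
--     prefix = [0]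
--     for c in blocks:
--         prefix.append(prefix[-1] + (c == 'W'))
--     return min((prefix[i + k] - prefix[i] for i in range(len(blocks) - k + 1)), default=k)
-- ===== Notes on version B (the rewrite author's own statement) =====
-- stated objective: alternative
-- what changed: Replaces the fused sliding-window loop (running recolor count, left pointer, early break) by a two-pass prefix-sum formulation: build P with P[i] = number of 'W' in blocks[:i], then take min(P[i+k]-P[i]) over all window starts, defaulting to k when no full window exists.
import Mathlib
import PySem

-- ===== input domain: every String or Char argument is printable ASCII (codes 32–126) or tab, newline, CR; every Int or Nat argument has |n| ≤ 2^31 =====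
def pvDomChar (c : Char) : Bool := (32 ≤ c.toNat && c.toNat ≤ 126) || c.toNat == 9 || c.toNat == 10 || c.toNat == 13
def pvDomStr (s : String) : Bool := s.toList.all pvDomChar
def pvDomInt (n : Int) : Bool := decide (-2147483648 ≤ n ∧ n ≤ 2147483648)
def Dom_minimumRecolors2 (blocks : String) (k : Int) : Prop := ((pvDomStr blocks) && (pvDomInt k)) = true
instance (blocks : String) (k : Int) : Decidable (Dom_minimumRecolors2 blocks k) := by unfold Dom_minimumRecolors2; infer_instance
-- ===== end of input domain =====

-- B replaces A's fused sliding-window loop (running count, left pointer, early break) by a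
-- prefix-sum table built in one pass and scanned in a second pass (alternative decomposition, same cost).

-- ===== PORT A =====
-- the fused sliding-window loop of A, with its early 'break' on res == 0
def pvLoopA (blocks : String) (k : Int) : List Int → Int → Int → Int → Int
  | [], res, _recolor, _l => res
  | r :: rest, res, recolor, l =>
    let recolor1 := if PySem.Str.pyGet? blocks r = some 'W' then recolor + 1 else recolor
    let st :=
      if r - l + 1 = k then
        (min res recolor1,
         if PySem.Str.pyGet? blocks l = some 'W' then recolor1 - 1 else recolor1,
         l + 1)
      else (res, recolor1, l)
    if st.1 = 0 then st.1 else pvLoopA blocks k rest st.1 st.2.1 st.2.2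

def minimumRecolors2 (blocks : String) (k : Int) : Int :=
  pvLoopA blocks k (PySem.List.pyRange 0 (PySem.Str.len blocks) 1) k 0 0

-- ===== PORT B =====
def minimumRecolors2_alt (blocks : String) (k : Int) : Int :=
  if k < 1 then k
  else
    let pre := blocks.toList.foldl
      (fun p c => p ++ [PySem.List.pyGetD p (-1) 0 + (if c = 'W' then (1 : Int) else 0)]) [0]
    PySem.List.minD
      ((PySem.List.pyRange 0 (PySem.Str.len blocks - k + 1) 1).map
        (fun i => PySem.List.pyGetD pre (i + k) 0 - PySem.List.pyGetD pre i 0))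
      (fun x => x) k

-- ===== PRECONDITION & SPEC =====
def Spec_minimumRecolors2 (blocks : String) (k : Int) (out : Int) : Prop := out = minimumRecolors2_alt blocks k
instance (blocks : String) (k : Int) (out : Int) : Decidable (Spec_minimumRecolors2 blocks k out) := by unfold Spec_minimumRecolors2; infer_instance

-- ===== CLAIM (what is proved, stated in full; the proofs are below) =====
def Claim_equal_minimumRecolors2 : Prop := ∀ (blocks : String) (k : Int), Dom_minimumRecolors2 blocks k → Spec_minimumRecolors2 blocks k (minimumRecolors2 blocks k)

-- ===== LEMMAS AND PROOFS =====

-- number of 'W' in a list / in the first i characters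
def pvCnt (l : List Char) : Int := (l.countP (fun c => c == 'W') : Int)
def pvP (cs : List Char) (i : Nat) : Int := pvCnt (cs.take i)
-- whiteness of the window of length K starting at i
def pvW (cs : List Char) (K : Nat) (i : Nat) : Int := pvP cs (i + K) - pvP cs i
-- the common value: min over all full windows, k as default
def pvT (cs : List Char) (k : Int) : Int :=
  List.foldl min k ((List.range (cs.length + 1 - k.toNat)).map (pvW cs k.toNat))

lemma pvP_succ (cs : List Char) (i : Nat) (h : i < cs.length) :
    pvP cs (i + 1) = pvP cs i + (if cs[i] = 'W' then 1 else 0) := by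
  unfold pvP pvCnt
  rw [List.take_add_one, List.countP_append]
  simp [List.getElem?_eq_getElem h, List.countP_cons]
lemma pvP_mono (cs : List Char) {i j : Nat} (h : i ≤ j) : pvP cs i ≤ pvP cs j := by
  unfold pvP pvCnt
  have hsub : (cs.take i).Sublist (cs.take j) := by
    have := List.take_sublist i (cs.take j)
    rwa [List.take_take, Nat.min_eq_left h] at this
  exact_mod_cast hsub.countP_le
lemma pvW_nonneg (cs : List Char) (K i : Nat) : 0 ≤ pvW cs K i := by
  have := pvP_mono cs (i := i) (j := i + K) (by omega)
  unfold pvW; omega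
lemma pvW_le (cs : List Char) (K i : Nat) : pvW cs K i ≤ (K : Int) := by
  unfold pvW pvP pvCnt
  rw [List.take_add, List.countP_append]
  have := List.countP_le_length (l := List.take K (List.drop i cs)) (p := fun c => c == 'W')
  have := List.length_take_le K (List.drop i cs)
  push_cast
  omega
lemma pvFoldlMin_nonneg (l : List Int) (a : Int) (ha : 0 ≤ a) (hl : ∀ x ∈ l, 0 ≤ x) :
    0 ≤ List.foldl min a l := by
  rcases PySem.List.foldl_min_mem l a with h | h
  · omega
  · exact hl _ h
lemma pvFoldlMin_prefix (f : Nat → Int) (a : Int) {m m' : Nat} (h : m ≤ m') :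
    List.foldl min a ((List.range m').map f) ≤ List.foldl min a ((List.range m).map f) := by
  obtain ⟨d, rfl⟩ := Nat.exists_eq_add_of_le h
  rw [List.range_add, List.map_append, List.foldl_append]
  exact (PySem.List.foldl_min_le _ _).1
lemma pvT_nonneg (cs : List Char) (k : Int) (hk : 1 ≤ k) : 0 ≤ pvT cs k := by
  apply pvFoldlMin_nonneg _ _ (by omega)
  intro x hx
  simp only [List.mem_map] at hx
  obtain ⟨i, _, rfl⟩ := hx
  exact pvW_nonneg _ _ _
-- the sliding-window loop invariant
lemma pvLoopA_inv (blocks : String) (k : Int) (hk : 1 ≤ k) :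
    ∀ (m r : Nat), r + m = blocks.toList.length →
      pvLoopA blocks k (PySem.List.pyRange (r : Int) (PySem.Str.len blocks) 1)
        (List.foldl min k ((List.range (r + 1 - k.toNat)).map (pvW blocks.toList k.toNat)))
        (pvP blocks.toList r - pvP blocks.toList (r + 1 - k.toNat))
        ((r + 1 - k.toNat : Nat) : Int)
      = pvT blocks.toList k := by
  set cs := blocks.toList with hcs
  set K := k.toNat with hK
  have hkK : k = (K : Int) := by omega
  have hlen : PySem.Str.len blocks = (cs.length : Int) := by
    simp [PySem.Str.len_eq, hcs]
  have hget : ∀ (i : Nat) (hi : i < cs.length),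
      PySem.Str.pyGet? blocks (i : Int) = some (cs[i]'hi) := by
    intro i hi
    rw [PySem.Str.pyGet?_natCast, ← hcs, List.getElem?_eq_getElem hi]
  intro m
  induction m with
  | zero =>
    intro r hr
    rw [hlen, PySem.List.pyRange_one_eq_nil (by omega)]
    simp only [pvLoopA]
    obtain rfl : r = cs.length := by omega
    rfl
  | succ m ih =>
    intro r hr
    have hrn : r < cs.length := by omega
    set n := cs.length with hn
    set L : Nat := r + 1 - K with hL
    rw [hlen, PySem.List.pyRange_one_cons (by omega)]
    simp only [pvLoopA]
    rw [hget r hrn]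
    by_cases hc : K ≤ r + 1
    · have hLr : L + K = r + 1 := by omega
      have hLn : L < n := by omega
      rw [if_pos (show (r : Int) - (L : Int) + 1 = k by omega)]
      have hrec1 : (if some (cs[r]'hrn) = some 'W'
            then (pvP cs r - pvP cs L) + 1 else (pvP cs r - pvP cs L))
          = pvP cs (r+1) - pvP cs L := by
        have h1 := pvP_succ cs r hrn
        simp only [Option.some.injEq]
        split_ifs with hw <;> simp [hw] at h1 <;> omega
      have hwin : pvP cs (r+1) - pvP cs L = pvW cs K L := by
        unfold pvW
        rw [hLr]
      have hres' : min (List.foldl min k ((List.range L).map (pvW cs K))) (pvW cs K L)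
          = List.foldl min k ((List.range (L+1)).map (pvW cs K)) := by
        rw [List.range_succ, List.map_append, List.foldl_append]
        simp
      have hrec2 : (if some (cs[L]'hLn) = some 'W'
            then (pvP cs (r+1) - pvP cs L) - 1 else (pvP cs (r+1) - pvP cs L))
          = pvP cs (r+1) - pvP cs (L+1) := by
        have h1 := pvP_succ cs L hLn
        simp only [Option.some.injEq]
        split_ifs with hw <;> simp [hw] at h1 <;> omega
      rw [hget L hLn, hrec1, hrec2, hwin, hres']
      simp only
      by_cases hres : List.foldl min k ((List.range (L+1)).map (pvW cs K)) = 0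
      · rw [if_pos hres]
        have h1 : pvT cs k ≤ List.foldl min k ((List.range (L+1)).map (pvW cs K)) := by
          unfold pvT
          rw [← hK, ← hn]
          exact pvFoldlMin_prefix _ _ (by omega)
        have h2 := pvT_nonneg cs k hk
        omega
      · rw [if_neg hres]
        rw [show ((L : Nat) : Int) + 1 = ((r + 1 + 1 - K : Nat) : Int) by omega]
        rw [show (L + 1 : Nat) = r + 1 + 1 - K by omega]
        rw [show (r : Int) + 1 = ((r + 1 : Nat) : Int) by push_cast; ring]
        rw [← hlen]
        exact ih (r+1) (by omega)
    · have hL0 : L = 0 := by omega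
      rw [if_neg (show ¬ ((r : Int) - (L : Int) + 1 = k) by omega)]
      have hrec1 : (if some (cs[r]'hrn) = some 'W'
            then (pvP cs r - pvP cs L) + 1 else (pvP cs r - pvP cs L))
          = pvP cs (r+1) - pvP cs L := by
        have h1 := pvP_succ cs r hrn
        simp only [Option.some.injEq]
        split_ifs with hw <;> simp [hw] at h1 <;> omega
      rw [hrec1]
      simp only
      have hres : List.foldl min k ((List.range L).map (pvW cs K)) = k := by
        rw [hL0]; simp
      rw [hres, if_neg (by omega)]
      have ih' := ih (r+1) (by omega)
      rw [show (r + 1 + 1 - K : Nat) = L by omega] at ih'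
      rw [hres] at ih'
      rw [show (r : Int) + 1 = ((r + 1 : Nat) : Int) by push_cast; ring]
      rw [← hlen]
      exact ih'
lemma pvA_eq_pvT (blocks : String) (k : Int) (hk : 1 ≤ k) :
    minimumRecolors2 blocks k = pvT blocks.toList k := by
  have h := pvLoopA_inv blocks k hk blocks.toList.length 0 (by omega)
  rw [show (0 + 1 - k.toNat : Nat) = 0 from by omega] at h
  simp [pvP, pvCnt] at h
  unfold minimumRecolors2
  convert h using 2

lemma pvLoopA_nonpos (blocks : String) (k : Int) (hk : k ≤ 0) :
    ∀ (rs : List Int), (∀ x ∈ rs, 0 ≤ x) → ∀ recolor, pvLoopA blocks k rs k recolor 0 = k := by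
  intro rs
  induction rs with
  | nil => intro _ _; rfl
  | cons r rest ih =>
    intro hpos recolor
    simp only [pvLoopA]
    have hr : 0 ≤ r := hpos r (by simp)
    rw [if_neg (show ¬(r - 0 + 1 = k) by omega)]
    simp only
    by_cases h0 : k = 0
    · rw [if_pos h0]
    · rw [if_neg h0]
      exact ih (fun x hx => hpos x (by simp [hx])) _

-- B's prefix list, characterised
def pvPartial : List Char → Int → List Int
  | [], _ => []
  | c :: t, a =>
    let a' := a + (if c = 'W' then (1 : Int) else 0)
    a' :: pvPartial t a'

lemma pvPre_build (cs : List Char) : ∀ (q : List Int) (a : Int),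
    cs.foldl (fun p c => p ++ [PySem.List.pyGetD p (-1) 0 + (if c = 'W' then (1 : Int) else 0)]) (q ++ [a])
      = (q ++ [a]) ++ pvPartial cs a := by
  induction cs with
  | nil => simp [pvPartial]
  | cons c t ih =>
    intro q a
    simp only [List.foldl_cons, PySem.List.pyGetD_neg_one_append_singleton]
    rw [ih (q ++ [a]) (a + (if c = 'W' then (1:Int) else 0))]
    simp [pvPartial]
lemma pvPartial_getD (cs : List Char) : ∀ (a : Int) (i : Nat), i ≤ cs.length →
    (a :: pvPartial cs a).getD i 0 = a + pvCnt (cs.take i) := by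
  induction cs with
  | nil =>
    intro a i hi
    simp at hi
    subst hi
    simp [pvCnt]
  | cons c t ih =>
    intro a i hi
    cases i with
    | zero => simp [pvCnt]
    | succ j =>
      simp only [pvPartial, List.getD_cons_succ]
      rw [ih _ j (by simpa using hi)]
      simp [pvCnt, List.countP_cons]
      split_ifs with h1 <;> ring
lemma pvMinD_cons (x : Int) (t : List Int) (d : Int) :
    PySem.List.minD (x :: t) (fun y => y) d = t.foldl min x := by
  simp [PySem.List.minD, PySem.List.min?_id_cons]

lemma pvB_eq_pvT (blocks : String) (k : Int) (hk : 1 ≤ k) :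
    minimumRecolors2_alt blocks k = pvT blocks.toList k := by
  have hkK : k = (k.toNat : Int) := by omega
  set cs := blocks.toList with hcs
  set n := cs.length with hn
  set K := k.toNat with hK
  have hpre : cs.foldl
      (fun p c => p ++ [PySem.List.pyGetD p (-1) 0 + (if c = 'W' then (1 : Int) else 0)]) [0]
      = (0 : Int) :: pvPartial cs 0 := by
    have := pvPre_build cs [] 0
    simpa using this
  have hget : ∀ i : Nat, i ≤ n →
      PySem.List.pyGetD ((0 : Int) :: pvPartial cs 0) (i : Int) 0 = pvP cs i := by
    intro i hi
    rw [PySem.List.pyGetD_natCast, pvPartial_getD cs 0 i hi]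
    simp [pvP]
  have hlen : PySem.Str.len blocks = (n : Int) := by
    simp [PySem.Str.len_eq, hcs, hn]
  unfold minimumRecolors2_alt
  rw [if_neg (by omega)]
  simp only [← hcs, hpre, hlen]
  by_cases hKn : K ≤ n
  · have hrange : PySem.List.pyRange 0 ((n : Int) - k + 1) 1
        = (List.range (n + 1 - K)).map (fun j : Nat => (0 : Int) + j) := by
      rw [PySem.List.pyRange_one]
      congr 1
      congr 1
      omega
    rw [hrange, List.map_map]
    have hmap : ((List.range (n + 1 - K)).map
        ((fun i => PySem.List.pyGetD ((0:Int) :: pvPartial cs 0) (i + k) 0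
                 - PySem.List.pyGetD ((0:Int) :: pvPartial cs 0) i 0) ∘ (fun j : Nat => (0 : Int) + j)))
        = (List.range (n + 1 - K)).map (pvW cs K) := by
      apply List.map_congr_left
      intro j hj
      simp only [List.mem_range] at hj
      have hjk : ((0 : Int) + j) + k = ((j + K : Nat) : Int) := by push_cast; omega
      simp only [Function.comp_apply, zero_add]
      rw [show (j : Int) + k = ((j + K : Nat) : Int) by push_cast; omega]
      rw [hget (j + K) (by omega), hget j (by omega)]
      rfl
    rw [hmap]
    have hM : n + 1 - K = (n - K) + 1 := by omega
    rw [hM, List.range_succ_eq_map, List.map_cons, pvMinD_cons]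
    unfold pvT
    rw [← hK, ← hn, hM, List.range_succ_eq_map, List.map_cons, List.foldl_cons]
    rw [show min k (pvW cs K 0) = pvW cs K 0 by
      have h1 := pvW_le cs K 0
      rw [min_comm]; exact min_eq_left (by omega)]
  · have hrange : PySem.List.pyRange 0 ((n : Int) - k + 1) 1 = [] := by
      apply PySem.List.pyRange_one_eq_nil
      omega
    rw [hrange, List.map_nil]
    have hT : n + 1 - K = 0 := by omega
    unfold pvT
    rw [← hK, ← hn, hT]
    rfl
-- ===== VERDICT (by name: the statement is the Claim_ definition above) =====
theorem minimumRecolors2_spec : Claim_equal_minimumRecolors2 := by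
  intro blocks k _
  unfold Spec_minimumRecolors2
  by_cases hk : 1 ≤ k
  · rw [pvA_eq_pvT blocks k hk, pvB_eq_pvT blocks k hk]
  · have hk' : k ≤ 0 := by omega
    have hA : minimumRecolors2 blocks k = k := by
      unfold minimumRecolors2
      exact pvLoopA_nonpos blocks k hk' _ (by
        intro x hx
        have := (PySem.List.mem_pyRange_one).1 hx
        omega) 0
    have hB : minimumRecolors2_alt blocks k = k := by
      unfold minimumRecolors2_alt
      simp [show k < 1 from by omega]
    rw [hA, hB]
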